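-- pv_equiv track=rewrite | github.com/yeele/aoj | problems/prp_time_planner_v2.py | meeting_planner_naivie
-- ===== SOURCE A (Python) =====
-- def meeting_planner_naivie(slotsA, slotsB, dur):
--     # naive soltion # O(n**2)
--     # pseudo code
--     for (As, Ae) in slotsA:
--         for (Bs, Be) in slotsB:
--             start = max(As, Bs)
--             end = min(Ae, Be)
--             if start + dur <= end:
--                 return [start, start+dur]
--     return []
-- ===== SOURCE B (Python) =====
-- def meeting_planner_naivie(slotsA, slotsB, dur):
--     # Loop inversion with a shrinking search bound: scan slotsB in the OUTER
--     # loop, keeping the candidate whose A-index is smallest so far; each later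
--     # B slot only scans the A-prefix strictly before that index.  The result
--     # is the candidate at the lexicographically smallest (A-index, B-index)
--     # pair, which is exactly what A's nested early-return scan yields.
--     best_i = len(slotsA)
--     best = []
--     for bs, be in slotsB:
--         for i, (a_s, a_e) in enumerate(slotsA):
--             if i >= best_i:
--                 break
--             start = max(a_s, bs)
--             if start + dur <= min(a_e, be):
--                 best_i, best = i, [start, start + dur]
--                 break
--     return best
-- ===== Notes on version B (the rewrite author's own statement) =====
-- stated objective: alternative
-- what changed: B inverts the loop nesting: it scans slotsB in the outer loop and keeps an accumulator (best A-index, candidate), shrinking the inner scan of slotsA to the prefix before the best index found so far, instead of A's early-return nested scan over slotsA outer.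
import Mathlib
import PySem

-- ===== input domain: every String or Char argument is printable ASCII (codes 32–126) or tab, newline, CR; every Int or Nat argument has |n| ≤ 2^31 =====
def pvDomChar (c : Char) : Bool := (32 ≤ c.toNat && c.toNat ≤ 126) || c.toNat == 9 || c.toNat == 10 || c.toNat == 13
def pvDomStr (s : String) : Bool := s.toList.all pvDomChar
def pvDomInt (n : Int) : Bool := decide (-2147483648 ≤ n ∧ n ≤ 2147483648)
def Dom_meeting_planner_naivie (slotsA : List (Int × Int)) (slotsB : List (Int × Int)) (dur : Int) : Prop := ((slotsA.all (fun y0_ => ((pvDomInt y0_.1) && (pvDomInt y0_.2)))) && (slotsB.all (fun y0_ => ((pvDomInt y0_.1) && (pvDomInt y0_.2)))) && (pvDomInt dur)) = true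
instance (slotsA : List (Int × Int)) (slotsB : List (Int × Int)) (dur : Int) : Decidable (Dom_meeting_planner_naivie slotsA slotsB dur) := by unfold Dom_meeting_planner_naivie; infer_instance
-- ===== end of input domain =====

-- B inverts the loop nesting (slotsB outer, accumulator with a shrinking search
-- bound over slotsA); same return value as A's early-return nested scan (objective: alternative).

-- ===== PORT A =====
-- inner 'for (Bs, Be) in slotsB' loop with early return
def mpnInner (As Ae dur : Int) : List (Int × Int) → Option (List Int)
  | [] => none
  | (bs, be) :: rest =>
      let start := max As bs
      let stop := min Ae be
      if start + dur ≤ stop then some [start, start + dur] else mpnInner As Ae dur rest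

-- outer 'for (As, Ae) in slotsA' loop with early return
def mpnOuter (slotsB : List (Int × Int)) (dur : Int) : List (Int × Int) → Option (List Int)
  | [] => none
  | (as_, ae) :: rest =>
      match mpnInner as_ ae dur slotsB with
      | some r => some r
      | none => mpnOuter slotsB dur rest

def meeting_planner_naivie (slotsA : List (Int × Int)) (slotsB : List (Int × Int)) (dur : Int) : List Int :=
  (mpnOuter slotsB dur slotsA).getD []

-- ===== PORT B =====
-- inner 'for i, (a_s, a_e) in enumerate(slotsA)' with 'break' at i >= best_i
def altInner (bs be dur : Int) (bestI : Nat) : List (Int × Int) → Nat → Option (Nat × List Int)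
  | [], _ => none
  | (as_, ae) :: rest, i =>
      if bestI ≤ i then none
      else
        let start := max as_ bs
        if start + dur ≤ min ae be then some (i, [start, start + dur])
        else altInner bs be dur bestI rest (i + 1)

-- outer 'for bs, be in slotsB' fold carrying (best_i, best)
def meeting_planner_naivie_alt (slotsA : List (Int × Int)) (slotsB : List (Int × Int)) (dur : Int) : List Int :=
  (slotsB.foldl (fun st b =>
      match altInner b.1 b.2 dur st.1 slotsA 0 with
      | some (i, r) => (i, r)
      | none => st) (slotsA.length, ([] : List Int))).2

-- ===== PRECONDITION & SPEC =====
def Spec_meeting_planner_naivie (slotsA : List (Int × Int)) (slotsB : List (Int × Int)) (dur : Int) (out : List Int) : Prop := out = meeting_planner_naivie_alt slotsA slotsB dur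
instance (slotsA : List (Int × Int)) (slotsB : List (Int × Int)) (dur : Int) (out : List Int) : Decidable (Spec_meeting_planner_naivie slotsA slotsB dur out) := by unfold Spec_meeting_planner_naivie; infer_instance

-- ===== CLAIM (what is proved, stated in full; the proofs are below) =====
def Claim_equal_meeting_planner_naivie : Prop := ∀ (slotsA : List (Int × Int)) (slotsB : List (Int × Int)) (dur : Int), Dom_meeting_planner_naivie slotsA slotsB dur → Spec_meeting_planner_naivie slotsA slotsB dur (meeting_planner_naivie slotsA slotsB dur)

-- ===== LEMMAS AND PROOFS =====

-- the candidate a pair (a, b) produces, if any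
def cand (dur : Int) (a b : Int × Int) : Option (List Int) :=
  if max a.1 b.1 + dur ≤ min a.2 b.2 then some [max a.1 b.1, max a.1 b.1 + dur] else none

-- first index in an A-list overlapping b, with its candidate
def firstIdx (dur : Int) (b : Int × Int) : List (Int × Int) → Option (Nat × List Int)
  | [] => none
  | a :: l => match cand dur a b with
      | some r => some (0, r)
      | none => (firstIdx dur b l).map (fun p => (p.1 + 1, p.2))

-- indexed version of A's search order: first A-index with a hit, candidate from first hitting b
def kk (dur : Int) (sb : List (Int × Int)) : List (Int × Int) → Option (Nat × List Int)
  | [] => none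
  | a :: l => match sb.findSome? (cand dur a) with
      | some r => some (0, r)
      | none => (kk dur sb l).map (fun p => (p.1 + 1, p.2))

-- spec-level step of B's fold
def stepSpec (slotsA : List (Int × Int)) (dur : Int) (st : Nat × List Int) (b : Int × Int) : Nat × List Int :=
  match firstIdx dur b (slotsA.take st.1) with
  | some p => p
  | none => st

theorem mpnInner_eq (As Ae dur : Int) (sb : List (Int × Int)) :
    mpnInner As Ae dur sb = sb.findSome? (cand dur (As, Ae)) := by
  induction sb with
  | nil => rfl
  | cons b rest ih => cases b with
    | mk bs be => simp [mpnInner, List.findSome?_cons, ih, cand]; split <;> rfl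

theorem mpnOuter_eq (sb : List (Int × Int)) (dur : Int) (sa : List (Int × Int)) :
    mpnOuter sb dur sa = (kk dur sb sa).map (·.2) := by
  induction sa with
  | nil => rfl
  | cons a rest ih => cases a with
    | mk as_ ae =>
      simp only [mpnOuter, kk, mpnInner_eq, ih]
      cases sb.findSome? (cand dur (as_, ae)) with
      | some r => rfl
      | none => cases kk dur sb rest <;> rfl

theorem altInner_eq (bs be dur : Int) (l : List (Int × Int)) :
    ∀ (i bestI : Nat), altInner bs be dur bestI l i
      = (firstIdx dur (bs, be) (l.take (bestI - i))).map (fun p => (i + p.1, p.2)) := by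
  induction l with
  | nil => intro i bestI; cases bestI - i <;> rfl
  | cons a rest ih =>
      intro i bestI
      cases a with
      | mk as_ ae =>
        by_cases h : bestI ≤ i
        · have : bestI - i = 0 := by omega
          simp [altInner, h, this, firstIdx]
        · have hk : bestI - i = (bestI - (i + 1)) + 1 := by omega
          simp only [altInner, if_neg h, hk, List.take_succ_cons, firstIdx]
          show (if max as_ bs + dur ≤ min ae be then some (i, [max as_ bs, max as_ bs + dur])
                else altInner bs be dur bestI rest (i + 1)) = _
          by_cases hc : max as_ bs + dur ≤ min ae be
          · simp [hc, cand]
          · simp only [cand, hc, if_false, ih (i + 1) bestI, Option.map_map]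
            cases firstIdx dur (bs, be) (rest.take (bestI - (i + 1))) with
            | none => rfl
            | some p => simp [Function.comp]; omega

theorem firstIdx_none_kk (dur : Int) (b : Int × Int) (rest : List (Int × Int))
    (l : List (Int × Int)) (h : firstIdx dur b l = none) :
    kk dur (b :: rest) l = kk dur rest l := by
  induction l with
  | nil => rfl
  | cons a l' ih =>
      simp only [firstIdx] at h
      cases hc : cand dur a b with
      | some r => simp [hc] at h
      | none =>
          simp only [hc, Option.map_eq_none_iff] at h
          simp only [kk, List.findSome?_cons, hc, ih h]

theorem firstIdx_lt_length (dur : Int) (b : Int × Int) (l : List (Int × Int)) (m : Nat)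
    (r : List Int) (h : firstIdx dur b l = some (m, r)) : m < l.length := by
  induction l generalizing m r with
  | nil => simp [firstIdx] at h
  | cons a l' ih =>
      simp only [firstIdx] at h
      cases hc : cand dur a b with
      | some r0 => simp [hc] at h; simp [List.length_cons]; omega
      | none =>
          simp only [hc] at h
          cases h' : firstIdx dur b l' with
          | none => simp [h'] at h
          | some q =>
              obtain ⟨q1, q2⟩ := q
              simp [h'] at h
              have := ih q1 q2 h'
              simp [List.length_cons]; omega

-- loop-interchange step: inserting b in front of the remaining B-list
theorem step_interchange (dur : Int) (b : Int × Int) (rest : List (Int × Int)) :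
    ∀ (l : List (Int × Int)) (m : Nat) (r : List Int), firstIdx dur b l = some (m, r) →
      kk dur (b :: rest) l
        = (match kk dur rest (l.take m) with
           | some p => some p
           | none => some (m, r)) := by
  intro l
  induction l with
  | nil => intro m r h; simp [firstIdx] at h
  | cons a l' ih =>
      intro m r h
      simp only [firstIdx] at h
      cases hc : cand dur a b with
      | some r0 =>
          simp [hc] at h
          obtain ⟨hm, hr⟩ := h
          subst hm hr
          simp [kk, hc]
      | none =>
          simp only [hc] at h
          cases h' : firstIdx dur b l' with
          | none => simp [h'] at h
          | some q =>
              obtain ⟨q1, q2⟩ := q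
              simp only [h', Option.map_some, Option.some.injEq, Prod.mk.injEq] at h
              obtain ⟨hm, hr⟩ := h
              subst hm; subst hr
              have ihq := ih q1 q2 h'
              simp only [kk, List.findSome?_cons, hc, List.take_succ_cons]

              cases hf : rest.findSome? (cand dur a) with
              | some r' => rfl
              | none =>
                  simp only [ihq]
                  cases kk dur rest (l'.take q1) with
                  | some p => rfl
                  | none => rfl

-- B's fold computes the indexed A-order search over the current prefix
theorem foldl_stepSpec (slotsA : List (Int × Int)) (dur : Int) (sb : List (Int × Int)) :
    ∀ (i0 : Nat) (r0 : List Int),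
      sb.foldl (stepSpec slotsA dur) (i0, r0)
        = (match kk dur sb (slotsA.take i0) with
           | some p => p
           | none => (i0, r0)) := by
  induction sb with
  | nil =>
      intro i0 r0
      have : ∀ l : List (Int × Int), kk dur [] l = none := by
        intro l; induction l with
        | nil => rfl
        | cons a l' ih => simp [kk, ih]
      simp [this]
  | cons b rest ih =>
      intro i0 r0
      simp only [List.foldl_cons]
      cases hfi : firstIdx dur b (slotsA.take i0) with
      | none =>
          have hstep : stepSpec slotsA dur (i0, r0) b = (i0, r0) := by
            simp [stepSpec, hfi]
          rw [hstep, ih, firstIdx_none_kk dur b rest _ hfi]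
      | some p =>
          have hstep : stepSpec slotsA dur (i0, r0) b = p := by
            simp [stepSpec, hfi]
          rw [hstep]
          obtain ⟨m, r⟩ := p
          rw [ih m r]
          have hlt : m < (slotsA.take i0).length := firstIdx_lt_length dur b _ m r hfi
          have hmi0 : m ≤ i0 := by
            have := hlt; simp [List.length_take] at this; omega
          have hmin : slotsA.take m = (slotsA.take i0).take m := by
            rw [List.take_take, Nat.min_eq_left hmi0]
          rw [hmin, step_interchange dur b rest (slotsA.take i0) m r hfi]
          cases kk dur rest ((slotsA.take i0).take m) with
          | some q => rfl
          | none => rfl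

-- ===== VERDICT (by name: the statement is the Claim_ definition above) =====
theorem meeting_planner_naivie_spec : Claim_equal_meeting_planner_naivie := by
  intro slotsA slotsB dur _
  unfold Spec_meeting_planner_naivie meeting_planner_naivie meeting_planner_naivie_alt
  have hfun : (fun (st : Nat × List Int) (b : Int × Int) =>
      match altInner b.1 b.2 dur st.1 slotsA 0 with
      | some (i, r) => (i, r)
      | none => st) = stepSpec slotsA dur := by
    funext st b
    rw [altInner_eq b.1 b.2 dur slotsA 0 st.1]
    simp only [Nat.sub_zero, stepSpec]
    cases firstIdx dur (b.1, b.2) (slotsA.take st.1) with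
    | none => rfl
    | some p => simp
  rw [hfun, foldl_stepSpec, mpnOuter_eq]
  simp only [List.take_length]
  cases kk dur slotsB slotsA with
  | none => rfl
  | some p => rfl
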